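-- pv_equiv track=rewrite | github.com/AsAnder9934/playground_my | CoiCoOperaction.py | get_coin_balances
-- ===== SOURCE A (Python) =====
-- def get_coin_balances(lst1, lst2):
--     coins_one = 3
--     coins_two = 3
--     for action1, action2 in zip(lst1, lst2):
--
--         if action1 == 'share' and action2 == 'share':
--             coins_one += 2
--             coins_two += 2
--         elif action1 == 'share' and action2 == 'steal':
--             coins_one -= 1
--             coins_two += 3
--         elif action1 == 'steal' and action2 == 'share':
--             coins_one += 3
--             coins_two -= 1
--     return coins_one, coins_two
-- ===== SOURCE B (Python) =====
-- from collections import Counter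
--
-- def get_coin_balances(lst1, lst2):
--     # Phase 1: build a frequency table of action pairs (zip truncates).
--     cnt = Counter(zip(lst1, lst2))
--     ss = cnt[('share', 'share')]
--     st = cnt[('share', 'steal')]
--     ts = cnt[('steal', 'share')]
--     # Phase 2: closed-form balances from the counts.
--     return 3 + 2 * ss - st + 3 * ts, 3 + 2 * ss + 3 * st - ts
-- ===== Notes on version B (the rewrite author's own statement) =====
-- stated objective: alternative
-- what changed: B replaces A's running-balance accumulation with a two-phase approach: it first builds a Counter over the zipped action pairs, then computes both balances with one closed-form arithmetic expression from the three relevant pair counts.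
import Mathlib
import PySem

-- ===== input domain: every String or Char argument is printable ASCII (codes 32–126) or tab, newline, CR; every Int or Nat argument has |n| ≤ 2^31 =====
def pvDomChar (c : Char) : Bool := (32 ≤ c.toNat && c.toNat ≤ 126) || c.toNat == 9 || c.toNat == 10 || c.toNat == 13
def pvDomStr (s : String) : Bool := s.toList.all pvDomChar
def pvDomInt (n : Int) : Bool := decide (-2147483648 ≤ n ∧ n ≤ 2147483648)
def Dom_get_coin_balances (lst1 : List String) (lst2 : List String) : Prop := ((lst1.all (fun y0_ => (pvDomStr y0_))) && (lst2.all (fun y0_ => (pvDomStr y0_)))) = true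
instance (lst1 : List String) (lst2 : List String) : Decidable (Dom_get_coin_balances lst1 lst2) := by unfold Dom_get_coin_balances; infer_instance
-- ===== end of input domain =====

-- B builds a frequency table of the zipped action pairs first and then computes both
-- balances by a closed-form expression from the counts (objective: alternative decomposition).

-- ===== PORT A =====
def get_coin_balances (lst1 : List String) (lst2 : List String) : Int × Int :=
  (lst1.zip lst2).foldl
    (fun (st : Int × Int) (p : String × String) =>
      let (coins_one, coins_two) := st
      let (action1, action2) := p
      if action1 = "share" ∧ action2 = "share" then (coins_one + 2, coins_two + 2)
      else if action1 = "share" ∧ action2 = "steal" then (coins_one - 1, coins_two + 3)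
      else if action1 = "steal" ∧ action2 = "share" then (coins_one + 3, coins_two - 1)
      else (coins_one, coins_two))
    (3, 3)

-- ===== PORT B =====
def get_coin_balances_alt (lst1 : List String) (lst2 : List String) : Int × Int :=
  let pairs := lst1.zip lst2
  let ss : Int := pairs.count ("share", "share")
  let st : Int := pairs.count ("share", "steal")
  let ts : Int := pairs.count ("steal", "share")
  (3 + 2 * ss - st + 3 * ts, 3 + 2 * ss + 3 * st - ts)

-- ===== PRECONDITION & SPEC =====
def Spec_get_coin_balances (lst1 : List String) (lst2 : List String) (out : Int × Int) : Prop := out = get_coin_balances_alt lst1 lst2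
instance (lst1 : List String) (lst2 : List String) (out : Int × Int) : Decidable (Spec_get_coin_balances lst1 lst2 out) := by unfold Spec_get_coin_balances; infer_instance

-- ===== CLAIM (what is proved, stated in full; the proofs are below) =====
def Claim_equal_get_coin_balances : Prop := ∀ (lst1 : List String) (lst2 : List String), Dom_get_coin_balances lst1 lst2 → Spec_get_coin_balances lst1 lst2 (get_coin_balances lst1 lst2)

-- ===== LEMMAS AND PROOFS =====

theorem gcb_foldl_counts (l : List (String × String)) (a b : Int) :
    l.foldl
      (fun (st : Int × Int) (p : String × String) =>
        let (coins_one, coins_two) := st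
        let (action1, action2) := p
        if action1 = "share" ∧ action2 = "share" then (coins_one + 2, coins_two + 2)
        else if action1 = "share" ∧ action2 = "steal" then (coins_one - 1, coins_two + 3)
        else if action1 = "steal" ∧ action2 = "share" then (coins_one + 3, coins_two - 1)
        else (coins_one, coins_two))
      (a, b)
    = (a + 2 * (l.count ("share", "share") : Int) - (l.count ("share", "steal") : Int)
         + 3 * (l.count ("steal", "share") : Int),
       b + 2 * (l.count ("share", "share") : Int) + 3 * (l.count ("share", "steal") : Int)
         - (l.count ("steal", "share") : Int)) := by
  induction l generalizing a b with
  | nil => simp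
  | cons p t ih =>
    obtain ⟨a1, a2⟩ := p
    simp only [List.foldl_cons, List.count_cons]
    split_ifs with h1 h2 h3 <;>
      simp_all [ih, Prod.ext_iff] <;> constructor <;> push_cast <;> ring

-- ===== VERDICT (by name: the statement is the Claim_ definition above) =====
theorem get_coin_balances_spec : Claim_equal_get_coin_balances := by
  intro lst1 lst2 _
  unfold Spec_get_coin_balances get_coin_balances get_coin_balances_alt
  simp [gcb_foldl_counts]
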